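-- pv_equiv track=rewrite | github.com/EduardoMirandaz/ICC-2 | atv11/main.py | montagem
-- ===== SOURCE A (Python) =====
-- def montagem(text1, text2):
--     if(text1 == '' or text2 == ''):
--         return
--     aux1 = text1+text2
--     aux2 = text1+text2
--
--     x = min(len(text1), len(text2))
--     y = max(len(text1), len(text2)) - min(len(text1), len(text2))
--     while (x > 0):
--
--         if text1[y:] == text2[:x]:
--             aux1 = text1[:y] + text1[y:] + text2[x:]
--         x -= 1
--         y += 1
--     x1 = x
--     x = min(len(text1), len(text2))
--     y = max(len(text1), len(text2)) - min(len(text1), len(text2))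
--     while (x > 0):
--         if text2[y:] == text1[:x]:
--             aux2 = text2[:y] + text2[y:] + text1[x:]
--         x -= 1
--         y += 1
--     x2 = x
--     if(len(aux1) == len(text1)):
--         aux1 = ""
--     if(len(aux2) == len(text2)):
--         aux2 = ""
--     if(len(aux1) < len(aux2)):
--         return aux1
--     else:
--         return aux2
-- ===== SOURCE B (Python) =====
-- def montagem(text1, text2):
--     if text1 == '' or text2 == '':
--         return None
--     both = text1 + text2
--
--     def merge(a, b):
--         # KMP: prefix function of b, automaton run over a gives the longest
--         # suffix of a that is a prefix of b; the failure chain then yields the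
--         # smallest positive overlap, all in O(len(a) + len(b)).
--         if len(a) < len(b):
--             return both
--         m = len(b)
--         pi = [0] * m
--         for i in range(1, m):
--             k = pi[i - 1]
--             while k > 0 and b[i] != b[k]:
--                 k = pi[k - 1]
--             if b[i] == b[k]:
--                 k += 1
--             pi[i] = k
--         k = 0
--         for c in a:
--             if k == m:
--                 k = pi[m - 1]
--             while k > 0 and b[k] != c:
--                 k = pi[k - 1]
--             if b[k] == c:
--                 k += 1
--         if k == 0:
--             return both
--         while pi[k - 1] > 0:
--             k = pi[k - 1]
--         return "" if k == m else a + b[k:]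
--
--     aux1 = merge(text1, text2)
--     aux2 = merge(text2, text1)
--     return aux1 if len(aux1) < len(aux2) else aux2
-- ===== Notes on version B (the rewrite author's own statement) =====
-- stated objective: faster
-- what changed: A's quadratic scans that build and compare O(n)-slices at every candidate overlap length are replaced by the KMP prefix-function: one linear pass builds the failure table of the second string, a linear automaton run over the first string yields the longest suffix/prefix overlap, and descending the failure chain picks the smallest valid overlap without ever comparing slices.
import Mathlib
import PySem

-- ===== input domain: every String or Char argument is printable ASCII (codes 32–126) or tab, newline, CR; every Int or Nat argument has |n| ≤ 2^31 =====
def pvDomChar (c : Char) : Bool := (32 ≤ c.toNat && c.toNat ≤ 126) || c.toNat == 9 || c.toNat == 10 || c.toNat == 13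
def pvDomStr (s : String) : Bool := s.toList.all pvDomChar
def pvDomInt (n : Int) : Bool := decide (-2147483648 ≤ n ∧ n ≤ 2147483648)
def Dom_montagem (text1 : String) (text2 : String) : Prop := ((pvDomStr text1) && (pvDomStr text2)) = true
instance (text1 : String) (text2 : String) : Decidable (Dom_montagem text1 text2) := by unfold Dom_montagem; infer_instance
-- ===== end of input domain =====

-- B replaces A's quadratic try-every-overlap slice comparisons by the KMP prefix-function:
-- a failure table of the second string, a linear automaton run over the first string, and a
-- failure-chain descent to the smallest valid overlap; return value only, no argument is mutated.

-- ===== PORT A =====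
-- A's while loop: x counts down (the Nat argument), y counts up; the last matching x overwrites aux.
-- Strings are handled as their code-point lists (PySem.List.slice = Python slicing); exact on all inputs.
def loopA (a b : List Char) : Nat → Int → List Char → List Char
  | 0, _, aux => aux
  | x+1, y, aux =>
      loopA a b x (y+1)
        (if PySem.List.slice a (some y) none = PySem.List.slice b none (some ((x:Int)+1))
         then PySem.List.slice a none (some y) ++ PySem.List.slice a (some y) none ++
              PySem.List.slice b (some ((x:Int)+1)) none
         else aux)

def montagem (text1 : String) (text2 : String) : Option String :=
  if text1 = "" ∨ text2 = "" then none
  else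
    let t1 := text1.toList
    let t2 := text2.toList
    let aux1 := t1 ++ t2
    let aux2 := t1 ++ t2
    let mn := min t1.length t2.length
    let mx := max t1.length t2.length
    let aux1 := loopA t1 t2 mn ((mx:Int) - (mn:Int)) aux1
    let aux2 := loopA t2 t1 mn ((mx:Int) - (mn:Int)) aux2
    let aux1 := if aux1.length = t1.length then [] else aux1
    let aux2 := if aux2.length = t2.length then [] else aux2
    if aux1.length < aux2.length then some (String.ofList aux1) else some (String.ofList aux2)

-- ===== PORT B =====
-- Source B's shared inner loop "while k > 0 and b[idx] != c: k = pi[k-1]"; the fuel argument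
-- (always called with fuel = k) only makes the recursion structural: k strictly decreases
-- because pi[k-1] < k on every real run.
def kmpW (b : List Char) (pi : List Nat) (c : Char) : Nat → Nat → Nat
  | 0, k => k
  | f+1, k => if k ≠ 0 ∧ b.getD k ' ' ≠ c then kmpW b pi c f (pi.getD (k-1) 0) else k

-- the loop body shared by the pi-construction and the automaton run: while-loop then "if b[k]==c: k+=1"
def kmpStep (b : List Char) (pi : List Nat) (c : Char) (k : Nat) : Nat :=
  let kw := kmpW b pi c k k
  if b.getD kw ' ' = c then kw + 1 else kw

-- "for i in range(1, m): ... pi[i] = k" — pi is built left to right, entry i is kmpStep at b[i]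
def piAux (b : List Char) (i : Nat) (pi : List Nat) : List Nat :=
  if i < b.length then
    piAux b (i+1) (pi ++ [kmpStep b pi (b.getD i ' ') (pi.getD (i-1) 0)])
  else pi
termination_by b.length - i

def buildPi (b : List Char) : List Nat :=
  if b.length = 0 then [] else piAux b 1 [0]

-- "for c in a: if k == m: k = pi[m-1]; <kmpStep>"
def scanK (b : List Char) (pi : List Nat) (a : List Char) : Nat :=
  a.foldl (fun k c => kmpStep b pi c (if k = b.length then pi.getD (b.length - 1) 0 else k)) 0

-- "while pi[k-1] > 0: k = pi[k-1]" (fuel = k again; the chain strictly decreases)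
def descend (pi : List Nat) : Nat → Nat → Nat
  | 0, k => k
  | f+1, k => if 0 < pi.getD (k-1) 0 then descend pi f (pi.getD (k-1) 0) else k

-- Source B's merge(a, b); both = the closure variable text1+text2
def mergeB (a b both : List Char) : List Char :=
  if a.length < b.length then both
  else
    let pi := buildPi b
    let k := scanK b pi a
    if k = 0 then both
    else
      let x := descend pi k k
      if x = b.length then [] else a ++ PySem.List.slice b (some (x:Int)) none

def montagem_alt (text1 : String) (text2 : String) : Option String :=
  if text1 = "" ∨ text2 = "" then none
  else
    let t1 := text1.toList
    let t2 := text2.toList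
    let both := t1 ++ t2
    let aux1 := mergeB t1 t2 both
    let aux2 := mergeB t2 t1 both
    if aux1.length < aux2.length then some (String.ofList aux1) else some (String.ofList aux2)

-- ===== PRECONDITION & SPEC =====
def Spec_montagem (text1 : String) (text2 : String) (out : Option String) : Prop := out = montagem_alt text1 text2
instance (text1 : String) (text2 : String) (out : Option String) : Decidable (Spec_montagem text1 text2 out) := by unfold Spec_montagem; infer_instance

-- ===== CLAIM (what is proved, stated in full; the proofs are below) =====
def Claim_equal_montagem : Prop := ∀ (text1 : String) (text2 : String), Dom_montagem text1 text2 → Spec_montagem text1 text2 (montagem text1 text2)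

-- ===== LEMMAS AND PROOFS =====

-- ---------- generic list facts ----------

lemma snoc_suffix_snoc (u s : List Char) (d c : Char) : u ++ [d] <:+ s ++ [c] ↔ d = c ∧ u <:+ s := by
  constructor
  · rintro ⟨t, ht⟩
    rw [← List.append_assoc] at ht
    have h2 := List.append_inj' ht rfl
    exact ⟨by simpa using h2.2, ⟨t, h2.1⟩⟩
  · rintro ⟨rfl, t, ht⟩
    exact ⟨t, by rw [← List.append_assoc, ht]⟩

lemma take_snoc (b : List Char) (i : Nat) (h : i < b.length) :
    b.take (i+1) = b.take i ++ [b.getD i ' '] := by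
  rw [List.take_add_one]
  simp [List.getElem?_eq_getElem h, List.getD]

-- b.take x <:+ s ++ [c] for 1 ≤ x ≤ m unfolds to a fact about s
lemma ov_snoc (b s : List Char) (c : Char) (x : Nat) (h1 : 1 ≤ x) (h2 : x ≤ b.length) :
    (b.take x <:+ s ++ [c]) ↔ (b.getD (x-1) ' ' = c ∧ b.take (x-1) <:+ s) := by
  have hx : x - 1 < b.length := by omega
  have : b.take x = b.take (x-1) ++ [b.getD (x-1) ' '] := by
    have := take_snoc b (x-1) hx
    rwa [show x - 1 + 1 = x from by omega] at this
  rw [this, snoc_suffix_snoc]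

lemma length_take_of_le (b : List Char) (x : Nat) (h : x ≤ b.length) : (b.take x).length = x := by
  simp; omega

-- suffixes of prefixes: if two prefixes of b are both suffixes of s, the shorter is a suffix of the longer
lemma take_suffix_take (b s : List Char) (x k : Nat) (hx : x ≤ b.length) (hk : k ≤ b.length)
    (hxk : x ≤ k) (h1 : b.take x <:+ s) (h2 : b.take k <:+ s) : b.take x <:+ b.take k :=
  List.suffix_of_suffix_length_le h1 h2
    (by rw [length_take_of_le b x hx, length_take_of_le b k hk]; exact hxk)

-- ---------- correctness of the pi table ----------

-- PC b pi K: entries pi[0] .. pi[K-1] are the longest proper borders of the prefixes of b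
def PC (b : List Char) (pi : List Nat) (K : Nat) : Prop :=
  ∀ j, 1 ≤ j → j ≤ K →
    pi.getD (j-1) 0 < j ∧ b.take (pi.getD (j-1) 0) <:+ b.take j ∧
      (∀ x, x < j → b.take x <:+ b.take j → x ≤ pi.getD (j-1) 0)

-- the while loop walks the failure chain down to the first state that can consume c (or 0)
lemma kmpW_spec (b : List Char) (pi : List Nat) (c : Char) (s : List Char) (B : Nat)
    (hB : B + 1 ≤ b.length) (hPC : PC b pi B) :
    ∀ fuel k, k ≤ fuel → k ≤ B → b.take k <:+ s →
      (∀ x, 1 ≤ x → x ≤ B + 1 → b.take x <:+ s ++ [c] → x ≤ k + 1) →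
      (kmpW b pi c fuel k ≤ k ∧ b.take (kmpW b pi c fuel k) <:+ s ∧
        (∀ x, 1 ≤ x → x ≤ B + 1 → b.take x <:+ s ++ [c] → x ≤ kmpW b pi c fuel k + 1) ∧
        (kmpW b pi c fuel k = 0 ∨ b.getD (kmpW b pi c fuel k) ' ' = c)) := by
  intro fuel
  induction fuel with
  | zero =>
      intro k hf hkB hsuf hinv
      have hk0 : k = 0 := by omega
      subst hk0
      exact ⟨le_rfl, hsuf, hinv, Or.inl rfl⟩
  | succ f ih =>
      intro k hf hkB hsuf hinv
      by_cases hcond : k ≠ 0 ∧ b.getD k ' ' ≠ c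
      · obtain ⟨hk0, hbc⟩ := hcond
        have hk1 : 1 ≤ k := by omega
        obtain ⟨hlt, hbord, hmaxk⟩ := hPC k hk1 hkB
        have hrw : kmpW b pi c (f+1) k = kmpW b pi c f (pi.getD (k-1) 0) := by
          rw [kmpW, if_pos ⟨hk0, hbc⟩]
        have hinv2 : ∀ x, 1 ≤ x → x ≤ B + 1 → b.take x <:+ s ++ [c] → x ≤ pi.getD (k-1) 0 + 1 := by
          intro x hx1 hxB hxov
          have hxk1 : x ≤ k + 1 := hinv x hx1 hxB hxov
          have hov := (ov_snoc b s c x hx1 (by omega)).mp hxov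
          have hxk : x ≤ k := by
            rcases Nat.lt_or_ge x (k+1) with h | h
            · omega
            · exfalso
              have hxe : x = k + 1 := by omega
              rw [hxe] at hov
              exact hbc (by simpa using hov.1)
          have hsub : b.take (x-1) <:+ b.take k :=
            take_suffix_take b s (x-1) k (by omega) (by omega) (by omega) hov.2 hsuf
          have := hmaxk (x-1) (by omega) hsub
          omega
        have hres := ih (pi.getD (k-1) 0) (by omega) (by omega) (hbord.trans hsuf) hinv2
        rw [hrw]
        exact ⟨hres.1.trans (by omega), hres.2.1, hres.2.2.1, hres.2.2.2⟩
      · have hrw : kmpW b pi c (f+1) k = k := by rw [kmpW, if_neg hcond]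
        rw [hrw]
        refine ⟨le_rfl, hsuf, hinv, ?_⟩
        by_cases hk0 : k = 0
        · exact Or.inl hk0
        · right
          by_contra hne
          exact hcond ⟨hk0, hne⟩

-- the full step: after the while loop, "if b[k]==c: k+=1" produces the longest overlap with s++[c]
lemma kmpStep_spec (b : List Char) (pi : List Nat) (c : Char) (s : List Char) (B k : Nat)
    (hB : B + 1 ≤ b.length) (hPC : PC b pi B) (hk : k ≤ B) (hsuf : b.take k <:+ s)
    (hmax : ∀ x, x ≤ B → b.take x <:+ s → x ≤ k) :
    kmpStep b pi c k ≤ B + 1 ∧ b.take (kmpStep b pi c k) <:+ s ++ [c] ∧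
      (∀ x, x ≤ B + 1 → b.take x <:+ s ++ [c] → x ≤ kmpStep b pi c k) := by
  have hinv : ∀ x, 1 ≤ x → x ≤ B + 1 → b.take x <:+ s ++ [c] → x ≤ k + 1 := by
    intro x hx1 hxB hxov
    have hov := (ov_snoc b s c x hx1 (by omega)).mp hxov
    have := hmax (x-1) (by omega) hov.2
    omega
  obtain ⟨hle, hsufw, hinvw, hdisj⟩ := kmpW_spec b pi c s B hB hPC k k le_rfl hk hsuf hinv
  unfold kmpStep
  by_cases hc : b.getD (kmpW b pi c k k) ' ' = c
  · rw [if_pos hc]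
    refine ⟨by omega, ?_, ?_⟩
    · exact (ov_snoc b s c (kmpW b pi c k k + 1) (by omega) (by omega)).mpr
        ⟨by simpa using hc, by simpa using hsufw⟩
    · intro x hxB hxov
      rcases Nat.eq_zero_or_pos x with h0 | h1
      · omega
      · exact hinvw x h1 hxB hxov
  · rw [if_neg hc]
    have hkw0 : kmpW b pi c k k = 0 := by
      rcases hdisj with h | h
      · exact h
      · exact absurd h hc
    rw [hkw0]
    refine ⟨by omega, by simp, ?_⟩
    intro x hxB hxov
    rcases Nat.eq_zero_or_pos x with h0 | h1
    · omega
    · exfalso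
      have := hinvw x h1 hxB hxov
      have hx1 : x = 1 := by omega
      subst hx1
      have hov := (ov_snoc b s c 1 le_rfl (by omega)).mp hxov
      rw [hkw0] at hc
      exact hc (by simpa using hov.1)

lemma piAux_spec (b : List Char) :
    ∀ n i pi, b.length - i = n → 1 ≤ i → i ≤ b.length → pi.length = i → PC b pi i →
      (piAux b i pi).length = b.length ∧ PC b (piAux b i pi) b.length := by
  intro n
  induction n with
  | zero =>
      intro i pi hn h1 him hlen hPC
      have hie : i = b.length := by omega
      rw [piAux, if_neg (by omega)]
      subst hie
      exact ⟨hlen, hPC⟩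
  | succ n ih =>
      intro i pi hn h1 him hlen hPC
      have hi : i < b.length := by omega
      rw [piAux, if_pos hi]
      have hk0 := hPC i h1 le_rfl
      have hstep := kmpStep_spec b pi (b.getD i ' ') (b.take i) (i-1) (pi.getD (i-1) 0)
        (by omega) (fun j hj1 hj2 => hPC j hj1 (by omega)) (by omega) hk0.2.1
        (fun x hx hov => by have := hk0.2.2 x (by omega) hov; omega)
      rw [show i - 1 + 1 = i from by omega] at hstep
      rw [← take_snoc b i hi] at hstep
      have hgetD_old : ∀ j, j < pi.length →
          (pi ++ [kmpStep b pi (b.getD i ' ') (pi.getD (i-1) 0)]).getD j 0 = pi.getD j 0 := by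
        intro j hj
        simp [List.getD, List.getElem?_append_left hj]
      have hPC' : PC b (pi ++ [kmpStep b pi (b.getD i ' ') (pi.getD (i-1) 0)]) (i+1) := by
        intro j hj1 hj2
        rcases Nat.lt_or_ge j (i+1) with hji | hji
        · have hjle : j ≤ i := by omega
          rw [hgetD_old (j-1) (by omega)]
          exact hPC j hj1 hjle
        · have hje : j = i + 1 := by omega
          subst hje
          have hgd : (pi ++ [kmpStep b pi (b.getD i ' ') (pi.getD (i-1) 0)]).getD i 0 =
              kmpStep b pi (b.getD i ' ') (pi.getD (i-1) 0) := by
            rw [← hlen]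
            simp [List.getD]
          rw [show i + 1 - 1 = i from by omega, hgd]
          refine ⟨by omega, hstep.2.1, ?_⟩
          intro x hx hov
          exact hstep.2.2 x (by omega) hov
      exact ih (i+1) _ (by omega) (by omega) (by omega) (by simp [hlen]) hPC'


lemma buildPi_spec (b : List Char) (hb : 1 ≤ b.length) :
    (buildPi b).length = b.length ∧ PC b (buildPi b) b.length := by
  rw [buildPi, if_neg (by omega)]
  refine piAux_spec b (b.length - 1) 1 [0] (by omega) le_rfl hb rfl ?_
  intro j hj1 hj2
  have hje : j = 1 := by omega
  subst hje
  refine ⟨by simp [List.getD], by simp [List.getD], ?_⟩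
  intro x hx _
  simp [List.getD]
  omega


-- ---------- the automaton run ----------

lemma scanK_spec (b : List Char) (pi : List Nat) (hb : 1 ≤ b.length)
    (hPC : PC b pi b.length) (a : List Char) :
    scanK b pi a ≤ b.length ∧ b.take (scanK b pi a) <:+ a ∧
      (∀ x, x ≤ b.length → b.take x <:+ a → x ≤ scanK b pi a) := by
  have main : ∀ (a s : List Char) (k : Nat),
      (k ≤ b.length ∧ b.take k <:+ s ∧ (∀ x, x ≤ b.length → b.take x <:+ s → x ≤ k)) →
      (a.foldl (fun k c => kmpStep b pi c (if k = b.length then pi.getD (b.length - 1) 0 else k)) k ≤ b.length ∧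
        b.take (a.foldl (fun k c => kmpStep b pi c (if k = b.length then pi.getD (b.length - 1) 0 else k)) k) <:+ s ++ a ∧
        (∀ x, x ≤ b.length → b.take x <:+ s ++ a →
          x ≤ a.foldl (fun k c => kmpStep b pi c (if k = b.length then pi.getD (b.length - 1) 0 else k)) k)) := by
    intro a
    induction a with
    | nil => intro s k h; simpa using h
    | cons c a iha =>
        intro s k h
        obtain ⟨hkm, hsuf, hmax⟩ := h
        rw [List.foldl_cons]
        have hstep : kmpStep b pi c (if k = b.length then pi.getD (b.length - 1) 0 else k) ≤ b.length ∧
            b.take (kmpStep b pi c (if k = b.length then pi.getD (b.length - 1) 0 else k)) <:+ s ++ [c] ∧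
            (∀ x, x ≤ b.length → b.take x <:+ s ++ [c] →
              x ≤ kmpStep b pi c (if k = b.length then pi.getD (b.length - 1) 0 else k)) := by
          have hm1 : b.length - 1 + 1 = b.length := by omega
          by_cases hkm' : k = b.length
          · rw [if_pos hkm']
            obtain ⟨hlt, hbord, hmaxm⟩ := hPC b.length hb le_rfl
            have hbs : b.take b.length <:+ s := by rw [← hkm']; exact hsuf
            have hres := kmpStep_spec b pi c s (b.length - 1) (pi.getD (b.length - 1) 0)
              (by omega) (fun j hj1 hj2 => hPC j hj1 (by omega)) (by omega)
              (hbord.trans hbs) ?_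
            · rw [hm1] at hres; exact hres
            · intro x hx hov
              exact hmaxm x (by omega)
                (take_suffix_take b s x b.length (by omega) le_rfl (by omega) hov hbs)
          · rw [if_neg hkm']
            have hres := kmpStep_spec b pi c s (b.length - 1) k (by omega)
              (fun j hj1 hj2 => hPC j hj1 (by omega)) (by omega) hsuf
              (fun x hx hov => hmax x (by omega) hov)
            rw [hm1] at hres; exact hres
        have := iha (s ++ [c]) _ hstep
        rwa [List.append_assoc, List.singleton_append] at this
  have base := main a [] 0 ⟨by omega, by simp, ?_⟩
  · simpa [scanK] using base
  · intro x hx hov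
    have := List.suffix_nil.mp hov
    have hlx := length_take_of_le b x hx
    rw [this] at hlx
    simpa using hlx.symm

-- ---------- the failure-chain descent ----------

lemma descend_spec (b : List Char) (pi : List Nat) (hPC : PC b pi b.length) :
    ∀ fuel k, k ≤ fuel → 1 ≤ k → k ≤ b.length →
      (1 ≤ descend pi fuel k ∧ descend pi fuel k ≤ k ∧
        b.take (descend pi fuel k) <:+ b.take k ∧
        (∀ x, 1 ≤ x → b.take x <:+ b.take k → descend pi fuel k ≤ x)) := by
  intro fuel
  induction fuel with
  | zero => intro k hf hk1; omega
  | succ f ih =>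
      intro k hf hk1 hkm
      obtain ⟨hlt, hbord, hmaxk⟩ := hPC k hk1 hkm
      rw [descend]
      by_cases hj : 0 < pi.getD (k-1) 0
      · rw [if_pos hj]
        obtain ⟨hr1, hrj, hrb, hrmin⟩ := ih (pi.getD (k-1) 0) (by omega) hj (by omega)
        refine ⟨hr1, by omega, hrb.trans hbord, ?_⟩
        intro x hx1 hbx
        by_cases hxk : x < k
        · have hxj := hmaxk x hxk hbx
          have : b.take x <:+ b.take (pi.getD (k-1) 0) :=
            take_suffix_take b (b.take k) x (pi.getD (k-1) 0) (by omega) (by omega) hxj hbx hbord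
          exact hrmin x hx1 this
        · omega
      · rw [if_neg hj]
        refine ⟨hk1, le_rfl, List.suffix_refl _, ?_⟩
        intro x hx1 hbx
        by_cases hxk : x < k
        · have := hmaxk x hxk hbx
          omega
        · omega

-- ---------- characterisation of A's loop (find? over ascending overlap lengths) ----------

def condA (a b : List Char) (mx : Int) (x : Nat) : Bool :=
  decide (PySem.List.slice a (some (mx - (x:Int))) none = PySem.List.slice b none (some (x:Int)))

def mergeAt (a b : List Char) (mx : Int) (x : Nat) : List Char :=
  PySem.List.slice a none (some (mx - (x:Int))) ++ PySem.List.slice a (some (mx - (x:Int))) none ++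
    PySem.List.slice b (some (x:Int)) none

lemma loopA_eq (a b : List Char) (mx : Int) :
    ∀ (n : Nat) (aux : List Char),
      loopA a b n (mx - (n:Int)) aux =
        match (List.range' 1 n).find? (condA a b mx) with
        | some x => mergeAt a b mx x
        | none => aux := by
  intro n
  induction n with
  | zero => intro aux; simp [loopA]
  | succ n ih =>
      intro aux
      have hy : mx - ((n + 1 : Nat) : Int) + 1 = mx - (n : Int) := by push_cast; ring
      have hr : List.range' 1 (n + 1) = List.range' 1 n ++ [n + 1] := by
        simpa [Nat.add_comm] using List.range'_concat (s := 1) (n := n) (step := 1)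
      rw [loopA, hy, ih, hr, List.find?_append]
      cases hfind : (List.range' 1 n).find? (condA a b mx) with
      | some x => simp
      | none =>
          simp only [Option.none_or]
          by_cases hc : condA a b mx (n + 1)
          · have hc' : PySem.List.slice a (some (mx - ((n + 1 : Nat) : Int))) none =
                PySem.List.slice b none (some ((n : Int) + 1)) := by
              have := of_decide_eq_true hc
              simpa [Nat.cast_add] using this
            rw [if_pos hc']
            simp [hc, mergeAt, Nat.cast_add]
          · have hc' : ¬ (PySem.List.slice a (some (mx - ((n + 1 : Nat) : Int))) none =
                PySem.List.slice b none (some ((n : Int) + 1))) := by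
              intro h
              exact hc (by simp [condA, Nat.cast_add] at h ⊢; exact_mod_cast h)
            rw [if_neg hc']
            simp [hc]

lemma find?_congr {α : Type} (l : List α) (p q : α → Bool) (h : ∀ x ∈ l, p x = q x) :
    l.find? p = l.find? q := by
  induction l with
  | nil => rfl
  | cons x l ih =>
      simp only [List.find?_cons]
      rw [h x (by simp)]
      cases q x
      · exact ih (fun y hy => h y (by simp [hy]))
      · rfl

-- on the active side A's slice comparison at x is exactly "b.take x is a suffix of a"
lemma condA_eq_suffix (a b : List Char) (hab : b.length ≤ a.length) (x : Nat)
    (hx1 : 1 ≤ x) (hx2 : x ≤ b.length) :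
    condA a b (a.length : Int) x = decide (b.take x <:+ a) := by
  have h1 : PySem.List.slice a (some ((a.length : Int) - (x : Int))) none = a.drop (a.length - x) := by
    rw [PySem.List.slice_from a (by omega)]
    congr 1
    omega
  have h2 : PySem.List.slice b none (some (x : Int)) = b.take x := by
    rw [PySem.List.slice_to b (by omega), show ((x : Int)).toNat = x from by omega]
  rw [condA, h1, h2]
  congr 1
  rw [List.suffix_iff_eq_drop, length_take_of_le b x hx2]
  exact propext eq_comm

-- find? over range' 1 m finds the stated minimum
lemma find?_range'_eq_some (p : Nat → Bool) :
    ∀ n s r, s ≤ r → r < s + n → p r = true → (∀ y, s ≤ y → y < r → p y = false) →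
      (List.range' s n).find? p = some r := by
  intro n
  induction n with
  | zero => intro s r h1 h2; omega
  | succ n ih =>
      intro s r h1 h2 hp hmin
      rw [show List.range' s (n+1) = s :: List.range' (s+1) n from by
            simpa using List.range'_succ (s := s) (n := n) (step := 1), List.find?_cons]
      by_cases hs : s = r
      · subst hs; rw [hp]
      · rw [hmin s le_rfl (by omega)]
        exact ih (s+1) r (by omega) (by omega) hp (fun y hy1 hy2 => hmin y (by omega) hy2)

lemma find?_range'_eq_none (p : Nat → Bool) (n s : Nat) (h : ∀ y, s ≤ y → y < s + n → p y = false) :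
    (List.range' s n).find? p = none := by
  rw [List.find?_eq_none]
  intro x hx
  have := List.mem_range'_1.mp hx
  exact fun hc => by rw [h x this.1 (by omega)] at hc; cases hc

-- ---------- one direction of the merge ----------

lemma dir_eq (a b D : List Char) (hD : D.length = a.length + b.length) (hb : b ≠ []) :
    (if (loopA a b (min a.length b.length) ((max a.length b.length : Nat) - (min a.length b.length : Nat) : Int)
          D).length = a.length
     then ([] : List Char)
     else loopA a b (min a.length b.length) ((max a.length b.length : Nat) - (min a.length b.length : Nat) : Int) D)
    = mergeB a b D := by
  have hbl : 0 < b.length := List.length_pos_iff.mpr hb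
  by_cases hab : b.length ≤ a.length
  · -- active direction: b may overlap a suffix of a
    have hmn : min a.length b.length = b.length := by omega
    have hmx : max a.length b.length = a.length := by omega
    obtain ⟨hplen, hPC⟩ := buildPi_spec b hbl
    obtain ⟨hKm, hKsuf, hKmax⟩ := scanK_spec b (buildPi b) hbl hPC a
    have hmerge : mergeB a b D =
        (if scanK b (buildPi b) a = 0 then D
         else if descend (buildPi b) (scanK b (buildPi b) a) (scanK b (buildPi b) a) = b.length
              then []
              else a ++ PySem.List.slice b
                (some ((descend (buildPi b) (scanK b (buildPi b) a) (scanK b (buildPi b) a) : Nat) : Int)) none) := by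
      rw [mergeB, if_neg (by omega)]
    rw [hmn, hmx, loopA_eq a b (a.length : Int) b.length D,
      find?_congr _ _ _ (fun x hx => by
        have hx' := List.mem_range'_1.mp hx
        exact condA_eq_suffix a b hab x hx'.1 (by omega)), hmerge]
    by_cases hK0 : scanK b (buildPi b) a = 0
    · have hfind : (List.range' 1 b.length).find? (fun x => decide (b.take x <:+ a)) = none := by
        refine find?_range'_eq_none _ b.length 1 ?_
        intro y hy1 hy2
        refine decide_eq_false ?_
        intro hys
        have := hKmax y (by omega) hys
        omega
      rw [hfind, if_pos hK0]
      show (if D.length = a.length then ([] : List Char) else D) = D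
      rw [if_neg (by rw [hD]; omega)]
    · obtain ⟨hr1, hrK, hrb, hrmin⟩ :=
        descend_spec b (buildPi b) hPC (scanK b (buildPi b) a) (scanK b (buildPi b) a) le_rfl (by omega) hKm
      have hrm : descend (buildPi b) (scanK b (buildPi b) a) (scanK b (buildPi b) a) ≤ b.length := by omega
      have hra : b.take (descend (buildPi b) (scanK b (buildPi b) a) (scanK b (buildPi b) a)) <:+ a :=
        hrb.trans hKsuf
      have hfind : (List.range' 1 b.length).find? (fun x => decide (b.take x <:+ a)) =
          some (descend (buildPi b) (scanK b (buildPi b) a) (scanK b (buildPi b) a)) := by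
        refine find?_range'_eq_some _ b.length 1 _ hr1 (by omega) (decide_eq_true hra) ?_
        intro y hy1 hy2
        refine decide_eq_false ?_
        intro hys
        have hyK := hKmax y (by omega) hys
        have : b.take y <:+ b.take (scanK b (buildPi b) a) :=
          take_suffix_take b a y (scanK b (buildPi b) a) (by omega) hKm hyK hys hKsuf
        have := hrmin y hy1 this
        omega
      rw [hfind, if_neg hK0]
      have hslice : PySem.List.slice b
          (some ((descend (buildPi b) (scanK b (buildPi b) a) (scanK b (buildPi b) a) : Nat) : Int)) none =
          b.drop (descend (buildPi b) (scanK b (buildPi b) a) (scanK b (buildPi b) a)) := by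
        rw [PySem.List.slice_from b (by omega), Int.toNat_natCast]
      have hmergeAt : mergeAt a b (a.length : Int)
          (descend (buildPi b) (scanK b (buildPi b) a) (scanK b (buildPi b) a)) =
          a ++ b.drop (descend (buildPi b) (scanK b (buildPi b) a) (scanK b (buildPi b) a)) := by
        rw [mergeAt, hslice, PySem.List.slice_from a (by omega), PySem.List.slice_to a (by omega),
          show ((a.length : Int) - (descend (buildPi b) (scanK b (buildPi b) a) (scanK b (buildPi b) a) : Nat)).toNat
            = a.length - descend (buildPi b) (scanK b (buildPi b) a) (scanK b (buildPi b) a) from by omega,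
          List.take_append_drop]
      show (if (mergeAt a b (a.length : Int)
              (descend (buildPi b) (scanK b (buildPi b) a) (scanK b (buildPi b) a))).length = a.length
            then ([] : List Char)
            else mergeAt a b (a.length : Int)
              (descend (buildPi b) (scanK b (buildPi b) a) (scanK b (buildPi b) a))) = _
      rw [hmergeAt]
      by_cases hrbm : descend (buildPi b) (scanK b (buildPi b) a) (scanK b (buildPi b) a) = b.length
      · rw [if_pos (by simp [hrbm]), if_pos hrbm]
      · rw [if_neg (by simp; omega), if_neg hrbm, hslice]
  · -- inactive direction: all of A's comparisons are between lists of different lengths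
    have hmn : min a.length b.length = a.length := by omega
    have hmx : max a.length b.length = b.length := by omega
    rw [hmn, hmx, loopA_eq a b (b.length : Int) a.length D]
    have hfind : (List.range' 1 a.length).find? (condA a b (b.length : Int)) = none := by
      refine find?_range'_eq_none _ a.length 1 ?_
      intro y hy1 hy2
      refine decide_eq_false ?_
      intro hcontra
      have hlen := congrArg List.length hcontra
      rw [PySem.List.slice_from a (by omega), PySem.List.slice_to b (by omega)] at hlen
      simp at hlen
      omega
    rw [hfind]
    show (if D.length = a.length then ([] : List Char) else D) = _
    rw [if_neg (by rw [hD]; omega), mergeB, if_pos (by omega)]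

theorem montagem_eq_alt (text1 text2 : String) : montagem text1 text2 = montagem_alt text1 text2 := by
  unfold montagem montagem_alt
  by_cases h : text1 = "" ∨ text2 = ""
  · simp [h]
  · rw [if_neg h, if_neg h]
    rw [not_or] at h
    have h1 : text1.toList ≠ [] := by
      intro hh
      exact h.1 (by simpa using congrArg String.ofList hh)
    have h2 : text2.toList ≠ [] := by
      intro hh
      exact h.2 (by simpa using congrArg String.ofList hh)
    dsimp only
    rw [dir_eq text1.toList text2.toList (text1.toList ++ text2.toList) (by simp) h2]
    rw [Nat.min_comm text1.toList.length text2.toList.length,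
      Nat.max_comm text1.toList.length text2.toList.length]
    rw [dir_eq text2.toList text1.toList (text1.toList ++ text2.toList)
      (by simp [Nat.add_comm]) h1]

-- ===== VERDICT (by name: the statement is the Claim_ definition above) =====
theorem montagem_spec : Claim_equal_montagem := by
  intro text1 text2 _
  exact montagem_eq_alt text1 text2
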